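-- pv_equiv track=rewrite | github.com/a-utkarsh/python-programs | GeeksforGeeks/sumDIgit.py | sumx
-- ===== SOURCE A (Python) =====
-- def sumx(N):
--
--     list1=list(str(N))
--     list2=[]
--     for i in list1:
--         list2.append(int(i))
--     sum1= list2[0]+list2[len(list2)-1]
--     sum2=0
--     for i in range(1,len(list2)-1):
--         sum2= sum2+list2[i]
--     if sum1==sum2:
--         return "YES"
--     else:
--         return "NO"
-- ===== SOURCE B (Python) =====
-- def sumx(N):
--     last = N % 10
--     n = N // 10
--     middle = 0
--     while n >= 10:
--         middle += n % 10
--         n //= 10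
--     return "YES" if n + last == middle else "NO"
-- ===== Notes on version B (the rewrite author's own statement) =====
-- stated objective: alternative
-- what changed: B extracts digits arithmetically by divmod peeling (no str()/int() conversion, no list): it takes the last digit via modulus, then strips digits off the quotient in a while loop accumulating the middle-digit sum until only the leading digit remains.
import Mathlib
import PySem

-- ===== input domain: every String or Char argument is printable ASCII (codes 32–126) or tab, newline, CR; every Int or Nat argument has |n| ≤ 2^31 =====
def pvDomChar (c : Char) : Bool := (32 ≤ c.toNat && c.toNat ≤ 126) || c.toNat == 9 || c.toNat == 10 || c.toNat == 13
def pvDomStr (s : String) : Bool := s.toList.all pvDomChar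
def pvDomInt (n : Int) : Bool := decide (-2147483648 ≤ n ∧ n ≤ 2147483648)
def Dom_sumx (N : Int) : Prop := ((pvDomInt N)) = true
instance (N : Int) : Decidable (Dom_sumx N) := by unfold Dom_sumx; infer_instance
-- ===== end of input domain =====

-- B extracts digits by integer divmod peeling instead of A's str()/int() list; same asymptotic cost.

-- ===== PORT A =====
def sumx (N : Int) : String :=
  let list1 : List Char := (PySem.Int.toStr N).toList
  let list2 : List Int := list1.foldl (fun acc i => acc ++ [(PySem.Int.ofStr? (String.ofList [i])).getD 0]) []
  let sum1 : Int := PySem.List.pyGetD list2 0 0 + PySem.List.pyGetD list2 ((list2.length : Int) - 1) 0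
  let sum2 : Int := (PySem.List.pyRange 1 ((list2.length : Int) - 1) 1).foldl (fun acc i => acc + PySem.List.pyGetD list2 i 0) 0
  if sum1 == sum2 then "YES" else "NO"

-- ===== PORT B =====
-- the digit-peeling while loop of Source B, as structural recursion on n
def sumxLoop (n middle : Int) : Int × Int :=
  if _h : 10 ≤ n then
    sumxLoop (PySem.Int.floordiv n 10) (middle + PySem.Int.mod n 10)
  else (n, middle)
termination_by n.toNat
decreasing_by
  have h1 : PySem.Int.floordiv n 10 = n / 10 := by
    simp [PySem.Int.floordiv, Int.fdiv_eq_ediv_of_nonneg (a := n) (b := 10) (by omega)]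
  omega

def sumx_alt (N : Int) : String :=
  let last := PySem.Int.mod N 10
  let p := sumxLoop (PySem.Int.floordiv N 10) 0
  if p.1 + last == p.2 then "YES" else "NO"

-- ===== PRECONDITION & SPEC =====
-- Pre_ excludes negative N, where str(N) starts with '-' and int('-') raises ValueError in A.
def Pre_sumx (N : Int) : Prop := 0 ≤ N
instance (N : Int) : Decidable (Pre_sumx N) := by unfold Pre_sumx; infer_instance
def pvWitness_sumx : Int := (1234)
def Spec_sumx (N : Int) (out : String) : Prop := out = sumx_alt N
instance (N : Int) (out : String) : Decidable (Spec_sumx N out) := by unfold Spec_sumx; infer_instance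

-- ===== CLAIM (what is proved, stated in full; the proofs are below) =====
def Claim_equal_sumx : Prop := ∀ (N : Int), Dom_sumx N → Pre_sumx N → Spec_sumx N (sumx N)

-- ===== LEMMAS AND PROOFS =====

theorem pvMod (m : Nat) : PySem.Int.mod (m : Int) 10 = ((m % 10 : Nat) : Int) := by
  rw [PySem.Int.mod_eq_emod_of_pos (by norm_num)]; omega

theorem pvFd (m : Nat) : PySem.Int.floordiv (m : Int) 10 = ((m / 10 : Nat) : Int) := by
  rw [PySem.Int.floordiv_eq_ediv_of_pos (by norm_num)]; omega

-- A's comparison 'sum1 == sum2' as a proposition, for reasoning about port A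
def pvAcond (ds : List Int) : Prop :=
  PySem.List.pyGetD ds 0 0 + PySem.List.pyGetD ds ((ds.length : Int) - 1) 0 =
    (PySem.List.pyRange 1 ((ds.length : Int) - 1) 1).foldl
      (fun acc i => acc + PySem.List.pyGetD ds i 0) 0

-- characterisation of A's comparison on a nonempty digit list
theorem cond_iff (ds : List Int) (h : ds ≠ []) :
    pvAcond ds ↔ (2 * (PySem.List.pyGetD ds 0 0 + PySem.List.pyGetD ds (-1) 0) = ds.sum) := by
  unfold pvAcond
  obtain ⟨x, t, rfl⟩ := List.exists_cons_of_ne_nil h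
  rcases eq_or_ne t [] with rfl | ht
  · have e1 : PySem.List.pyGetD [x] 0 0 = x := PySem.List.pyGetD_zero_cons x [] 0
    have e2 : (([x] : List Int).length : Int) - 1 = 0 := by simp
    have e3 : PySem.List.pyGetD [x] (-1) 0 = x := by
      rw [PySem.List.pyGetD_neg_one [x] 0 (by simp)]; simp
    rw [e2, e1, e3, PySem.List.pyRange_one_eq_nil (by omega)]
    simp only [List.foldl_nil, List.sum_cons, List.sum_nil]
    omega
  · have hds : x :: t = (x :: t.dropLast) ++ [t.getLast ht] := by
      simp [List.dropLast_concat_getLast ht]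
    set mid := t.dropLast with hmid
    set e := t.getLast ht with he
    have ht1 : 1 ≤ t.length := List.length_pos_of_ne_nil ht
    have hld : mid.length = t.length - 1 := List.length_dropLast
    have hlen : ((x :: t).length : Int) - 1 = ((x :: mid).length : Int) := by
      simp; omega
    have h0 : PySem.List.pyGetD (x :: t) 0 0 = x := PySem.List.pyGetD_zero_cons x t 0
    have hneg : PySem.List.pyGetD (x :: t) (-1) 0 = e := by
      rw [PySem.List.pyGetD_neg_one (x :: t) 0 (by simp)]
      rw [List.getLast_cons ht]
    have hlast : PySem.List.pyGetD (x :: t) (((x :: t).length : Int) - 1) 0 = e := by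
      rw [hlen, PySem.List.pyGetD_eq_getElem (x :: t) 0 (by positivity)
        (by simp; omega)]
      simp only [Int.toNat_natCast]
      rw [List.getElem_of_eq hds]
      simp
    have hfold : (PySem.List.pyRange 1 (((x :: t).length : Int) - 1) 1).foldl
        (fun acc i => acc + PySem.List.pyGetD (x :: t) i 0) 0 = mid.sum := by
      rw [hlen]
      rw [PySem.List.foldl_congr_mem _ _
        (fun acc i => acc + PySem.List.pyGetD (x :: mid) i 0) 0 ?hc]
      case hc =>
        intro acc i hi
        dsimp only
        rw [PySem.List.mem_pyRange_one] at hi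
        have hi1 : (0:Int) ≤ i := by omega
        have hi2 : i < ((x :: mid).length : Int) := hi.2
        have hi3 : i < ((x :: t).length : Int) := by simp at hi2 ⊢; omega
        rw [PySem.List.pyGetD_eq_getElem (x :: t) 0 hi1 hi3,
            PySem.List.pyGetD_eq_getElem (x :: mid) 0 hi1 hi2]
        have hi4 : i.toNat < (x :: mid).length := by
          simp at hi2 ⊢; omega
        have h3 : (x :: t)[i.toNat]'(by simp at hi3 ⊢; omega)
            = (x :: mid)[i.toNat]'hi4 := by
          rw [List.getElem_of_eq hds]
          exact List.getElem_append_left hi4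
        rw [h3]
      · have key := PySem.List.foldl_pyRange_pyGetD (x :: mid) 0
          (fun acc v => acc + v) (0 : Int) (a := 1) (by omega)
        simp only [PySem.List.len_eq] at key
        rw [key]
        simp [List.sum_eq_foldl]
    rw [h0, hneg, hlast, hfold]
    have hsum : (x :: t).sum = x + mid.sum + e := by
      conv_lhs => rw [hds]
      simp; ring
    rw [hsum]
    omega

-- int(c) inverts Nat.digitChar on decimal digits
theorem ofStr_digitChar (d : Nat) (hd : d < 10) :
    (PySem.Int.ofStr? (String.ofList [Nat.digitChar d])).getD 0 = (d : Int) := by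
  interval_cases d <;> decide

-- Nat.toDigitsCore produces the base-10 digits, most significant first
theorem toDigitsCore_eq (f : Nat) : ∀ (n : Nat) (acc : List Char), n < f →
    Nat.toDigitsCore 10 f n acc =
      (if n = 0 then ['0'] else ((Nat.digits 10 n).map Nat.digitChar).reverse) ++ acc := by
  induction f with
  | zero => intro n acc h; omega
  | succ f ih =>
    intro n acc h
    rw [Nat.toDigitsCore]
    by_cases h10 : n / 10 = 0
    · have hn : n < 10 := by omega
      simp only [h10, if_true]
      by_cases h0 : n = 0
      · subst h0; simp [Nat.digitChar]
      · have : Nat.digits 10 n = [n] := by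
          rw [Nat.digits_def' (by norm_num) (by omega)]
          simp [Nat.mod_eq_of_lt hn, h10]
        simp [h0, this, Nat.mod_eq_of_lt hn]
    · simp only [h10, if_false]
      have hn0 : n ≠ 0 := by omega
      have hlt : n / 10 < f := by omega
      rw [ih (n / 10) _ hlt]
      simp only [h10, if_false]
      have : Nat.digits 10 n = n % 10 :: Nat.digits 10 (n / 10) := by
        rw [Nat.digits_def' (by norm_num) (by omega)]
      rw [this]
      simp [hn0]

theorem toChars_eq (n : Nat) :
    PySem.Int.toChars (n : Int) =
      (if n = 0 then ['0'] else ((Nat.digits 10 n).map Nat.digitChar).reverse) := by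
  unfold PySem.Int.toChars
  split
  · omega
  · rw [Nat.toDigits]
    simp only [Int.toNat_natCast]
    rw [toDigitsCore_eq (n + 1) n [] (by omega)]
    simp

-- A's list2 equals the decimal digit values, most significant first
theorem list2_eq (n : Nat) :
    ((PySem.Int.toStr (n : Int)).toList).foldl
        (fun acc i => acc ++ [(PySem.Int.ofStr? (String.ofList [i])).getD 0]) []
      = (if n = 0 then [(0 : Int)] else ((Nat.digits 10 n).map (Nat.cast : Nat → Int)).reverse) := by
  have h1 : ((PySem.Int.toStr (n : Int)).toList).foldl
      (fun acc i => acc ++ [(PySem.Int.ofStr? (String.ofList [i])).getD 0]) []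
      = ((PySem.Int.toStr (n : Int)).toList).map
          (fun c => (PySem.Int.ofStr? (String.ofList [c])).getD 0) := by
    simpa using PySem.List.foldl_append_singleton_eq_map
      (fun c => (PySem.Int.ofStr? (String.ofList [c])).getD 0) ((PySem.Int.toStr (n : Int)).toList) []
  rw [h1, PySem.Int.toList_toStr, toChars_eq n]
  by_cases h0 : n = 0
  · subst h0; simp; decide
  · simp only [h0, if_false, List.map_reverse, List.map_map]
    congr 1
    apply List.map_congr_left
    intro d hd
    exact ofStr_digitChar d (Nat.digits_lt_base (by norm_num) hd)

-- the divmod loop of B computes the leading digit and the sum of the non-leading digits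
theorem sumxLoop_spec (m : Nat) : ∀ (acc : Int),
    sumxLoop (m : Int) acc =
      (((Nat.digits 10 m).getLastD 0 : Int), acc + ((Nat.digits 10 m).dropLast.sum : Int)) := by
  induction m using Nat.strong_induction_on with
  | _ m ih =>
    intro acc
    rw [sumxLoop]
    by_cases h : 10 ≤ (m : Int)
    · have hm : 10 ≤ m := by exact_mod_cast h
      rw [dif_pos h, pvFd m, pvMod m, ih (m / 10) (by omega)]
      have hD : Nat.digits 10 m = m % 10 :: Nat.digits 10 (m / 10) := by
        rw [Nat.digits_def' (by norm_num) (by omega)]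
      have hDne : Nat.digits 10 (m / 10) ≠ [] := by
        rw [Nat.digits_ne_nil_iff_ne_zero]; omega
      obtain ⟨D', g, hg⟩ := ((Nat.digits 10 (m / 10)).eq_nil_or_concat').resolve_left hDne
      rw [hD, hg]
      have hga : (D' ++ [g]).getLastD 0 = g := by simp
      have hgb : (m % 10 :: (D' ++ [g])).getLastD 0 = g := by
        rw [← List.cons_append]
        exact List.getLastD_concat
      have hda : (D' ++ [g]).dropLast = D' := List.dropLast_concat
      have hdb : (m % 10 :: (D' ++ [g])).dropLast = m % 10 :: D' :=
        List.dropLast_concat (l₁ := m % 10 :: D')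
      rw [hga, hgb, hda, hdb, Prod.mk.injEq]
      refine ⟨rfl, ?_⟩
      simp only [List.sum_cons]
      push_cast
      ring
    · rw [dif_neg h]
      have hm : m < 10 := by omega
      by_cases h0 : m = 0
      · subst h0; simp
      · have hd : Nat.digits 10 m = [m] := by
          rw [Nat.digits_def' (by norm_num) (by omega)]
          simp [Nat.mod_eq_of_lt hm, Nat.div_eq_of_lt hm]
        simp [hd]

-- A's comparison and B's comparison agree on every nonnegative n
theorem main_iff (n : Nat) :
    pvAcond (if n = 0 then [(0 : Int)] else ((Nat.digits 10 n).map (Nat.cast : Nat → Int)).reverse)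
      ↔ (((Nat.digits 10 (n / 10)).getLastD 0 : Int) + ((n % 10 : Nat) : Int)
          = 0 + ((Nat.digits 10 (n / 10)).dropLast.sum : Int)) := by
  by_cases h0 : n = 0
  · subst h0
    simp only [if_true]
    unfold pvAcond
    decide
  · simp only [h0, if_false]
    have hdig : Nat.digits 10 n = n % 10 :: Nat.digits 10 (n / 10) := by
      rw [Nat.digits_def' (by norm_num) (by omega)]
    rcases (Nat.digits 10 (n / 10)).eq_nil_or_concat' with hD | ⟨D', g, hg⟩
    · -- single-digit n : A compares 2n with 0, B compares n with 0; both fail for n ≠ 0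
      have hnd : n / 10 = 0 := by rwa [Nat.digits_eq_nil_iff_eq_zero] at hD
      have hn10 : n < 10 := by omega
      have hds : ((Nat.digits 10 n).map (Nat.cast : Nat → Int)).reverse = [((n % 10 : Nat) : Int)] := by
        rw [hdig, hD]; simp
      rw [hds, cond_iff _ (by simp), hD]
      have e1 : PySem.List.pyGetD [((n % 10 : Nat) : Int)] 0 0 = ((n % 10 : Nat) : Int) :=
        PySem.List.pyGetD_zero_cons _ [] 0
      have e3 : PySem.List.pyGetD [((n % 10 : Nat) : Int)] (-1) 0 = ((n % 10 : Nat) : Int) := by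
        rw [PySem.List.pyGetD_neg_one _ 0 (by simp)]; simp
      rw [e1, e3]
      simp only [List.getLastD_nil, List.dropLast_nil, List.sum_nil, List.sum_cons]
      constructor <;> intro hh <;> [skip; skip] <;> push_cast at hh ⊢ <;> omega
    · -- n has at least two digits
      have hds : ((Nat.digits 10 n).map (Nat.cast : Nat → Int)).reverse
          = ((g : Int) :: (D'.map (Nat.cast : Nat → Int)).reverse) ++ [((n % 10 : Nat) : Int)] := by
        rw [hdig, hg]; simp
      rw [hds, cond_iff _ (by simp), hg]
      have e1 : PySem.List.pyGetD (((g : Int) :: (D'.map (Nat.cast : Nat → Int)).reverse) ++ [((n % 10 : Nat) : Int)]) 0 0 = (g : Int) := by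
        rw [List.cons_append]
        exact PySem.List.pyGetD_zero_cons _ _ 0
      have e3 : PySem.List.pyGetD (((g : Int) :: (D'.map (Nat.cast : Nat → Int)).reverse) ++ [((n % 10 : Nat) : Int)]) (-1) 0 = ((n % 10 : Nat) : Int) :=
        PySem.List.pyGetD_neg_one_append_singleton _ _ 0
      rw [e1, e3, List.getLastD_concat, List.dropLast_concat]
      have hsum : ((((g : Int) :: (D'.map (Nat.cast : Nat → Int)).reverse) ++ [((n % 10 : Nat) : Int)]).sum)
          = (g : Int) + (D'.sum : Int) + ((n % 10 : Nat) : Int) := by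
        push_cast
        simp
        ring
      rw [hsum]
      push_cast
      omega

-- ===== VERDICT (by name: the statement is the Claim_ definition above) =====
theorem sumx_spec : Claim_equal_sumx := by
  intro N _ hPre
  obtain ⟨n, rfl⟩ : ∃ m : Nat, N = (m : Int) := ⟨N.toNat, (Int.toNat_of_nonneg hPre).symm⟩
  unfold Spec_sumx sumx sumx_alt
  simp only [list2_eq n]
  rw [pvMod n, pvFd n, sumxLoop_spec (n / 10) 0]
  have hiff := main_iff n
  by_cases hc : pvAcond (if n = 0 then [(0 : Int)] else ((Nat.digits 10 n).map (Nat.cast : Nat → Int)).reverse)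
  · have hb := hiff.mp hc
    unfold pvAcond at hc
    simp only [hc, hb]
    simp
  · have hb : ¬ (((Nat.digits 10 (n / 10)).getLastD 0 : Int) + ((n % 10 : Nat) : Int)
        = 0 + ((Nat.digits 10 (n / 10)).dropLast.sum : Int)) := fun hh => hc (hiff.mpr hh)
    unfold pvAcond at hc
    simp only [beq_iff_eq, if_neg hc, if_neg hb]
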